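-- pv_equiv track=rewrite | github.com/guo-xuan/SiprosBenchmark | src/Settings.py | get_protein_type_ecoli
-- ===== SOURCE A (Python) =====
-- label_train_str = 'Rev_'
--
-- label_test_str = 'TestRev_'
--
-- label_reserve_str = 'Rev_2_'
--
-- label_ecoli_str = 'lcl'
--
-- LabelEcoli = 0
--
-- LabelFwd = 1
--
-- LabelRevTrain = 2
--
-- LabelRevReserve = 3
--
-- LabelTest = 4
--
-- def get_protein_type_ecoli(protein_split_list):
--     for one_protein in protein_split_list:
--         if one_protein.startswith(label_ecoli_str):
--             return LabelEcoli
--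
--     for one_protein in protein_split_list:
--         if not (one_protein.startswith(label_train_str) or one_protein.startswith(label_test_str)):
--             return LabelFwd
--
--     for one_protein in protein_split_list:
--         if one_protein.startswith(label_test_str):
--             return LabelTest
--
--     if label_reserve_str != '':
--         for one_protein in protein_split_list:
--             if one_protein.startswith(label_reserve_str):
--                 return LabelRevReserve
--     return LabelRevTrain
-- ===== SOURCE B (Python) =====
-- label_train_str = 'Rev_'
-- label_test_str = 'TestRev_'
-- label_reserve_str = 'Rev_2_'
-- label_ecoli_str = 'lcl'
-- LabelEcoli = 0
-- LabelFwd = 1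
-- LabelRevTrain = 2
-- LabelRevReserve = 3
-- LabelTest = 4
--
-- def get_protein_type_ecoli(protein_split_list):
--     has_ecoli = has_fwd = has_test = has_reserve = False
--     for p in protein_split_list:
--         has_ecoli = has_ecoli or p.startswith(label_ecoli_str)
--         has_fwd = has_fwd or not (p.startswith(label_train_str) or p.startswith(label_test_str))
--         has_test = has_test or p.startswith(label_test_str)
--         has_reserve = has_reserve or p.startswith(label_reserve_str)
--     if has_ecoli:
--         return LabelEcoli
--     if has_fwd:
--         return LabelFwd
--     if has_test:
--         return LabelTest
--     if has_reserve:
--         return LabelRevReserve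
--     return LabelRevTrain
-- ===== Notes on version B (the rewrite author's own statement) =====
-- stated objective: simpler
-- what changed: Replaces A's four separate scans over the list by a single pass maintaining four booleans followed by one priority decision block.
import Mathlib
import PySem

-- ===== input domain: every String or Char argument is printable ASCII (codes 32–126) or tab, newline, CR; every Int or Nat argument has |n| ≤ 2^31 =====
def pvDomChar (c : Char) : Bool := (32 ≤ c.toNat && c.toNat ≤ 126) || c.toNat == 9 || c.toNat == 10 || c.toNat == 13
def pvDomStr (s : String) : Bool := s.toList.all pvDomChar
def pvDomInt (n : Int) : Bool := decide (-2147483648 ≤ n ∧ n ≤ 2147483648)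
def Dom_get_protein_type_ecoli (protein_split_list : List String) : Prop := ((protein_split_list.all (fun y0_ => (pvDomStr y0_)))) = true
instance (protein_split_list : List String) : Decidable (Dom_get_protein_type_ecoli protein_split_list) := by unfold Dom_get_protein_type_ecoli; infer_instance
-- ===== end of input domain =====

-- B replaces A's four separate scans by one pass keeping four booleans plus a priority decision (simpler).

-- ===== PORT A =====
-- each of A's four for-loops, as a scan returning the early-returned label if the loop returns
def aScanEcoli : List String → Option Int
  | [] => none
  | p :: rest => if PySem.Str.startswith p "lcl" then some 0 else aScanEcoli rest

def aScanFwd : List String → Option Int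
  | [] => none
  | p :: rest =>
    if !(PySem.Str.startswith p "Rev_" || PySem.Str.startswith p "TestRev_") then some 1
    else aScanFwd rest

def aScanTest : List String → Option Int
  | [] => none
  | p :: rest => if PySem.Str.startswith p "TestRev_" then some 4 else aScanTest rest

def aScanReserve : List String → Option Int
  | [] => none
  | p :: rest => if PySem.Str.startswith p "Rev_2_" then some 3 else aScanReserve rest

def get_protein_type_ecoli (protein_split_list : List String) : Int :=
  match aScanEcoli protein_split_list with
  | some v => v
  | none =>
    match aScanFwd protein_split_list with
    | some v => v
    | none =>
      match aScanTest protein_split_list with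
      | some v => v
      | none =>
        if ("Rev_2_" : String) ≠ "" then
          match aScanReserve protein_split_list with
          | some v => v
          | none => 2
        else 2

-- ===== PORT B =====
def get_protein_type_ecoli_alt (protein_split_list : List String) : Int :=
  let s := protein_split_list.foldl
    (fun (acc : Bool × Bool × Bool × Bool) p =>
      (acc.1 || PySem.Str.startswith p "lcl",
       acc.2.1 || !(PySem.Str.startswith p "Rev_" || PySem.Str.startswith p "TestRev_"),
       acc.2.2.1 || PySem.Str.startswith p "TestRev_",
       acc.2.2.2 || PySem.Str.startswith p "Rev_2_"))
    (false, false, false, false)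
  if s.1 then 0
  else if s.2.1 then 1
  else if s.2.2.1 then 4
  else if s.2.2.2 then 3
  else 2

-- ===== PRECONDITION & SPEC =====
def Spec_get_protein_type_ecoli (protein_split_list : List String) (out : Int) : Prop := out = get_protein_type_ecoli_alt protein_split_list
instance (protein_split_list : List String) (out : Int) : Decidable (Spec_get_protein_type_ecoli protein_split_list out) := by unfold Spec_get_protein_type_ecoli; infer_instance

-- ===== CLAIM (what is proved, stated in full; the proofs are below) =====
def Claim_equal_get_protein_type_ecoli : Prop := ∀ (protein_split_list : List String), Dom_get_protein_type_ecoli protein_split_list → Spec_get_protein_type_ecoli protein_split_list (get_protein_type_ecoli protein_split_list)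

-- ===== LEMMAS AND PROOFS =====

theorem aScanEcoli_eq (l : List String) :
    aScanEcoli l = if l.any (fun p => PySem.Str.startswith p "lcl") then some 0 else none := by
  induction l with
  | nil => rfl
  | cons p rest ih =>
    rw [aScanEcoli, List.any_cons]
    cases h : (PySem.Str.startswith p "lcl") <;>
      simp only [h, Bool.false_or, Bool.true_or, ih, if_true, Bool.false_eq_true, if_false]

theorem aScanFwd_eq (l : List String) :
    aScanFwd l = if l.any (fun p => !(PySem.Str.startswith p "Rev_" || PySem.Str.startswith p "TestRev_")) then some 1 else none := by
  induction l with
  | nil => rfl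
  | cons p rest ih =>
    rw [aScanFwd, List.any_cons]
    cases h : (!(PySem.Str.startswith p "Rev_" || PySem.Str.startswith p "TestRev_")) <;>
      simp only [h, Bool.false_or, Bool.true_or, ih, if_true, Bool.false_eq_true, if_false]

theorem aScanTest_eq (l : List String) :
    aScanTest l = if l.any (fun p => PySem.Str.startswith p "TestRev_") then some 4 else none := by
  induction l with
  | nil => rfl
  | cons p rest ih =>
    rw [aScanTest, List.any_cons]
    cases h : (PySem.Str.startswith p "TestRev_") <;>
      simp only [h, Bool.false_or, Bool.true_or, ih, if_true, Bool.false_eq_true, if_false]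

theorem aScanReserve_eq (l : List String) :
    aScanReserve l = if l.any (fun p => PySem.Str.startswith p "Rev_2_") then some 3 else none := by
  induction l with
  | nil => rfl
  | cons p rest ih =>
    rw [aScanReserve, List.any_cons]
    cases h : (PySem.Str.startswith p "Rev_2_") <;>
      simp only [h, Bool.false_or, Bool.true_or, ih, if_true, Bool.false_eq_true, if_false]

theorem altFold_eq (l : List String) (a b c d : Bool) :
    l.foldl
      (fun (acc : Bool × Bool × Bool × Bool) p =>
        (acc.1 || PySem.Str.startswith p "lcl",
         acc.2.1 || !(PySem.Str.startswith p "Rev_" || PySem.Str.startswith p "TestRev_"),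
         acc.2.2.1 || PySem.Str.startswith p "TestRev_",
         acc.2.2.2 || PySem.Str.startswith p "Rev_2_"))
      (a, b, c, d) =
    (a || l.any (fun p => PySem.Str.startswith p "lcl"),
     b || l.any (fun p => !(PySem.Str.startswith p "Rev_" || PySem.Str.startswith p "TestRev_")),
     c || l.any (fun p => PySem.Str.startswith p "TestRev_"),
     d || l.any (fun p => PySem.Str.startswith p "Rev_2_")) := by
  induction l generalizing a b c d with
  | nil => simp
  | cons p rest ih => simp only [List.foldl_cons, List.any_cons, ih, Bool.or_assoc]

-- ===== VERDICT (by name: the statement is the Claim_ definition above) =====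
theorem get_protein_type_ecoli_spec : Claim_equal_get_protein_type_ecoli := by
  intro l _
  unfold Spec_get_protein_type_ecoli get_protein_type_ecoli get_protein_type_ecoli_alt
  rw [aScanEcoli_eq, aScanFwd_eq, aScanTest_eq, aScanReserve_eq, altFold_eq]
  cases h1 : l.any (fun p => PySem.Str.startswith p "lcl") <;>
  cases h2 : l.any (fun p => !(PySem.Str.startswith p "Rev_" || PySem.Str.startswith p "TestRev_")) <;>
  cases h3 : l.any (fun p => PySem.Str.startswith p "TestRev_") <;>
  cases h4 : l.any (fun p => PySem.Str.startswith p "Rev_2_") <;>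
  simp only [h1, h2, h3, h4, Bool.false_or] <;> rfl
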